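-- pv_equiv track=rewrite | github.com/matteoscollo-3hsia/sales-ops-automation | src/primer_ops/render_docx.py | _leading_ws
-- ===== SOURCE A (Python) =====
-- def _leading_ws(line: str) -> int:
--     count = 0
--     for ch in line:
--         if ch == " ":
--             count += 1
--         elif ch == "\t":
--             count += 4
--         else:
--             break
--     return count
-- ===== SOURCE B (Python) =====
-- def _leading_ws(line: str) -> int:
--     prefix = line[: len(line) - len(line.lstrip(" \t"))]
--     return prefix.count(" ") + 4 * prefix.count("\t")
-- ===== Notes on version B (the rewrite author's own statement) =====
-- stated objective: simpler
-- what changed: Replaces the early-breaking character loop with string methods: lstrip over space-and-tab finds the leading-whitespace boundary, then two count() tallies over that prefix give the weight.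
import Mathlib
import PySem

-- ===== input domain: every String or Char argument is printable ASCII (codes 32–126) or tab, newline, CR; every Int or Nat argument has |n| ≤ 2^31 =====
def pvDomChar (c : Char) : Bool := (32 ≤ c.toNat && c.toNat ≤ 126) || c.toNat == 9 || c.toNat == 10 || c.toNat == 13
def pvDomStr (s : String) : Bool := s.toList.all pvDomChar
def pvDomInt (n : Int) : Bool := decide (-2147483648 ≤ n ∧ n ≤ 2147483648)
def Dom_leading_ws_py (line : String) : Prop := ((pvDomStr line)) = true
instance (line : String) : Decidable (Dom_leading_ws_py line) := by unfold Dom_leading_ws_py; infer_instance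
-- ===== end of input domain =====

-- B computes the same weight via lstrip(' \t') (boundary) plus two count() tallies, instead of A's
-- early-breaking loop; objective: simpler decomposition, same cost.

-- ===== PORT A =====
-- the for/break loop of A, as structural recursion over the characters with the accumulator `count`
def leadingWsLoop : List Char → Int → Int
  | [], count => count
  | c :: rest, count =>
      if c = ' ' then leadingWsLoop rest (count + 1)
      else if c = '\t' then leadingWsLoop rest (count + 4)
      else count

def leading_ws_py (line : String) : Int := leadingWsLoop line.toList 0

-- ===== PORT B =====
-- line.lstrip(" \t"): drop the leading run of ' '/'\t' (exact: Python drops exactly the chars in the set)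
def leading_ws_py_alt (line : String) : Int :=
  let cs := line.toList
  let pre := cs.take (cs.length - (cs.dropWhile (fun c => c == ' ' || c == '\t')).length)
  (pre.count ' ' : Int) + 4 * (pre.count '\t' : Int)

-- ===== PRECONDITION & SPEC =====
def Spec_leading_ws_py (line : String) (out : Int) : Prop := out = leading_ws_py_alt line
instance (line : String) (out : Int) : Decidable (Spec_leading_ws_py line out) := by unfold Spec_leading_ws_py; infer_instance

-- ===== CLAIM (what is proved, stated in full; the proofs are below) =====
def Claim_equal_leading_ws_py : Prop := ∀ (line : String), Dom_leading_ws_py line → Spec_leading_ws_py line (leading_ws_py line)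

-- ===== LEMMAS AND PROOFS =====

lemma take_sub_dropWhile (p : Char → Bool) (cs : List Char) :
    cs.take (cs.length - (cs.dropWhile p).length) = cs.takeWhile p := by
  have h : cs.length - (cs.dropWhile p).length = (cs.takeWhile p).length := by
    have := List.takeWhile_append_dropWhile (p := p) (l := cs)
    have hlen : (cs.takeWhile p).length + (cs.dropWhile p).length = cs.length := by
      conv_rhs => rw [← this]
      exact (List.length_append ..).symm
    omega
  rw [h]
  nth_rewrite 2 [← List.takeWhile_append_dropWhile (p := p) (l := cs)]
  exact List.take_left

lemma leadingWsLoop_eq (cs : List Char) (acc : Int) :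
    leadingWsLoop cs acc =
      acc + ((cs.takeWhile (fun c => c == ' ' || c == '\t')).count ' ' : Int)
          + 4 * ((cs.takeWhile (fun c => c == ' ' || c == '\t')).count '\t' : Int) := by
  induction cs generalizing acc with
  | nil => simp [leadingWsLoop]
  | cons c rest ih =>
    by_cases hs : c = ' '
    · subst hs
      simp only [leadingWsLoop, List.takeWhile_cons]
      norm_num [List.count_cons, ih]
      ring
    · by_cases ht : c = '\t'
      · subst ht
        simp only [leadingWsLoop, List.takeWhile_cons]
        norm_num [List.count_cons, ih, hs]
        ring
      · have hs' : (c == ' ') = false := by simp [hs]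
        have ht' : (c == '\t') = false := by simp [ht]
        simp [leadingWsLoop, hs, ht, hs', ht']

-- ===== VERDICT (by name: the statement is the Claim_ definition above) =====
theorem leading_ws_py_spec : Claim_equal_leading_ws_py := by
  intro line _
  show leading_ws_py line = leading_ws_py_alt line
  unfold leading_ws_py leading_ws_py_alt
  simp only [take_sub_dropWhile, leadingWsLoop_eq]
  ring
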